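-- pv_equiv track=rewrite | github.com/andy897221/BMC_PPI_L3N | src/domain.py | _check_binaryDDI
-- ===== SOURCE A (Python) =====
-- def _check_binaryDDI(p1, p2, GtoD, DDIr):
--     if p1 not in GtoD or p2 not in GtoD: return False
--     p1Domain, p2Domain = GtoD[p1], GtoD[p2]
--     for p1d in p1Domain:
--         if p1d not in DDIr: continue
--         for p2d in p2Domain:
--             if p2d in DDIr[p1d]: return True
--     return False
-- ===== SOURCE B (Python) =====
-- def _check_binaryDDI(p1, p2, GtoD, DDIr):
--     if p1 not in GtoD or p2 not in GtoD:
--         return False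
--     partners = set()
--     for d in GtoD[p1]:
--         partners.update(DDIr.get(d, ()))
--     return bool(partners & set(GtoD[p2]))
-- ===== Notes on version B (the rewrite author's own statement) =====
-- stated objective: alternative
-- what changed: Replaces A's early-returning nested scan over p1's and p2's domains with a build-then-intersect pass: one loop accumulates the union of all DDI partner sets of p1's domains into a set, then a single set intersection with p2's domains decides the answer.
import Mathlib
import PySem

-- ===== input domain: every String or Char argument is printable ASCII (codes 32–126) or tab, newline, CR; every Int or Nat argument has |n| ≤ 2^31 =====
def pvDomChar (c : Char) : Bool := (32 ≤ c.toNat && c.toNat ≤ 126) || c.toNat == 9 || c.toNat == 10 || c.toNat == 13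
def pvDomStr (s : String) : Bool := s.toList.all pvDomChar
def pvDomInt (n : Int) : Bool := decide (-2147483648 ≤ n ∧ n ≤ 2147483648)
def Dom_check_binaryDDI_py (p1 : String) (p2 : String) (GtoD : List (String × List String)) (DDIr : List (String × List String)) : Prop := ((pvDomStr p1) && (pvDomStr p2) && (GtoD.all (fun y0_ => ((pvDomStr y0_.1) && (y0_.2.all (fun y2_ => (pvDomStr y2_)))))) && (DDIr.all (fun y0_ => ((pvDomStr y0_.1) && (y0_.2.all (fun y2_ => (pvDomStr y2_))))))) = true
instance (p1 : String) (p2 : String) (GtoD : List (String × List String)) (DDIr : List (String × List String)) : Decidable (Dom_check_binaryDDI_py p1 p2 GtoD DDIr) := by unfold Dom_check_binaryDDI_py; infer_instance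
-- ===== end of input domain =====

-- B replaces A's early-returning nested scan with one pass that accumulates the union of all
-- DDI partner sets of p1's domains, then a single set intersection with p2's domains (objective: alternative).

-- ===== PORT A =====
def check_binaryDDI_py (p1 : String) (p2 : String) (GtoD : List (String × List String)) (DDIr : List (String × List String)) : Bool :=
  let gd := PySem.Dict.mk GtoD
  let dd := PySem.Dict.mk DDIr
  if !(gd.contains p1) || !(gd.contains p2) then false
  else
    let p1Domain := gd.getD p1 []
    let p2Domain := gd.getD p2 []
    -- nested for-loops with early 'return True' = nested any
    p1Domain.any (fun p1d =>
      match dd.get? p1d with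
      | none => false          -- 'continue'
      | some lst => p2Domain.any (fun p2d => lst.contains p2d))

-- ===== PORT B =====
def check_binaryDDI_py_alt (p1 : String) (p2 : String) (GtoD : List (String × List String)) (DDIr : List (String × List String)) : Bool :=
  let gd := PySem.Dict.mk GtoD
  if !(gd.contains p1) || !(gd.contains p2) then false
  else
    let dd := PySem.Dict.mk DDIr
    let partners := (gd.getD p1 []).foldl
      (fun s d => PySem.Set.update s (dd.getD d [])) PySem.Set.empty
    !(PySem.Set.inter partners (PySem.Set.ofList (gd.getD p2 []))).isEmpty

-- ===== PRECONDITION & SPEC =====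
def Spec_check_binaryDDI_py (p1 : String) (p2 : String) (GtoD : List (String × List String)) (DDIr : List (String × List String)) (out : Bool) : Prop := out = check_binaryDDI_py_alt p1 p2 GtoD DDIr
instance (p1 : String) (p2 : String) (GtoD : List (String × List String)) (DDIr : List (String × List String)) (out : Bool) : Decidable (Spec_check_binaryDDI_py p1 p2 GtoD DDIr out) := by unfold Spec_check_binaryDDI_py; infer_instance

-- ===== CLAIM (what is proved, stated in full; the proofs are below) =====
def Claim_equal_check_binaryDDI_py : Prop := ∀ (p1 : String) (p2 : String) (GtoD : List (String × List String)) (DDIr : List (String × List String)), Dom_check_binaryDDI_py p1 p2 GtoD DDIr → Spec_check_binaryDDI_py p1 p2 GtoD DDIr (check_binaryDDI_py p1 p2 GtoD DDIr)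

-- ===== LEMMAS AND PROOFS =====

-- membership in the partner set accumulated by B's loop
theorem mem_foldl_update {α : Type} [BEq α] [LawfulBEq α]
    (l : List α) (f : α → List α) (s : PySem.Set α) (y : α) :
    y ∈ l.foldl (fun s d => PySem.Set.update s (f d)) s ↔ y ∈ s ∨ ∃ d ∈ l, y ∈ f d := by
  induction l generalizing s with
  | nil => simp
  | cons a l ih =>
    simp only [List.foldl_cons, ih, PySem.Set.mem_update, List.mem_cons]
    constructor
    · rintro ((h | h) | ⟨d, hd, hy⟩)
      · exact Or.inl h
      · exact Or.inr ⟨a, Or.inl rfl, h⟩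
      · exact Or.inr ⟨d, Or.inr hd, hy⟩
    · rintro (h | ⟨d, (rfl | hd), hy⟩)
      · exact Or.inl (Or.inl h)
      · exact Or.inl (Or.inr hy)
      · exact Or.inr ⟨d, hd, hy⟩

-- A's nested any is true iff some pair of domains is in DDI relation (stated via getD)
theorem anyA_iff (dd : PySem.Dict String (List String)) (p1Dom p2Dom : List String) :
    (p1Dom.any (fun p1d =>
      match dd.get? p1d with
      | none => false
      | some lst => p2Dom.any (fun p2d => lst.contains p2d))) = true
    ↔ ∃ d ∈ p1Dom, ∃ y ∈ p2Dom, y ∈ dd.getD d [] := by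
  simp only [List.any_eq_true]
  constructor
  · rintro ⟨d, hd, h⟩
    cases hget : dd.get? d with
    | none => rw [hget] at h; exact absurd h (by simp)
    | some lst =>
      rw [hget] at h
      simp only [List.any_eq_true] at h
      obtain ⟨y, hy, hmem⟩ := h
      exact ⟨d, hd, y, hy, by simpa [PySem.Dict.getD_eq_get?_getD, hget] using hmem⟩
  · rintro ⟨d, hd, y, hy, hmem⟩
    refine ⟨d, hd, ?_⟩
    cases hget : dd.get? d with
    | none =>
      rw [PySem.Dict.getD_eq_get?_getD, hget] at hmem
      simp at hmem
    | some lst =>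
      rw [PySem.Dict.getD_eq_get?_getD, hget] at hmem
      simp only [List.any_eq_true]
      exact ⟨y, hy, by simpa using hmem⟩

-- ===== VERDICT (by name: the statement is the Claim_ definition above) =====
theorem check_binaryDDI_py_spec : Claim_equal_check_binaryDDI_py := by
  intro p1 p2 GtoD DDIr _
  unfold Spec_check_binaryDDI_py check_binaryDDI_py check_binaryDDI_py_alt
  simp only []
  split
  · rfl
  · rw [Bool.eq_iff_iff, anyA_iff]
    rw [Bool.not_eq_eq_eq_not, Bool.not_true] at *
    constructor
    · rintro ⟨d, hd, y, hy, hmem⟩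
      simp only [Bool.not_false, List.isEmpty_eq_false_iff_exists_mem] at *
      exact ⟨y, by
        rw [PySem.Set.mem_inter, mem_foldl_update, PySem.Set.mem_ofList]
        exact ⟨Or.inr ⟨d, hd, hmem⟩, hy⟩⟩
    · intro h
      simp only [Bool.not_false, List.isEmpty_eq_false_iff_exists_mem] at h
      obtain ⟨y, hy⟩ := h
      rw [PySem.Set.mem_inter, mem_foldl_update, PySem.Set.mem_ofList] at hy
      rcases hy with ⟨(h0 | ⟨d, hd, hmem⟩), hy2⟩
      · exact absurd h0 (by simp [PySem.Set.empty])
      · exact ⟨d, hd, y, hy2, hmem⟩
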